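-- pv_equiv track=rewrite | github.com/cjordan223/auto-tailor | skills-updater.py | ensure_proper_spacing
-- ===== SOURCE A (Python) =====
-- def ensure_proper_spacing(updated_block: str) -> str:
--     """Ensure proper spacing with empty lines after each \vspace{3pt}"""
--     # Split into lines
--     lines = updated_block.split('\n')
--     new_lines = []
--
--     for i, line in enumerate(lines):
--         new_lines.append(line)
--         # If this line contains \vspace{3pt}, ensure the next line is empty
--         if '\\vspace{3pt}' in line.strip():
--             # Check if the next line exists and is not empty
--             if i + 1 < len(lines) and lines[i + 1].strip():
--                 # Insert an empty line after this \vspace{3pt}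
--                 new_lines.append('')
--
--     return '\n'.join(new_lines)
-- ===== SOURCE B (Python) =====
-- def ensure_proper_spacing(updated_block: str) -> str:
--     """Ensure proper spacing with empty lines after each \vspace{3pt}"""
--     marker = '\\vspace{3pt}'
--     res = ''
--     rest = updated_block
--     while True:
--         j = rest.find(marker)
--         if j == -1:
--             break
--         eol = rest.find('\n', j)
--         if eol == -1:
--             break
--         nl2 = rest.find('\n', eol + 1)
--         nxt = rest[eol + 1:] if nl2 == -1 else rest[eol + 1:nl2]
--         res += rest[:eol + 1]
--         if nxt.strip():
--             res += '\n'
--         rest = rest[eol + 1:]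
--     return res + rest
-- ===== Notes on version B (the rewrite author's own statement) =====
-- stated objective: alternative
-- what changed: A splits the text into a line list and walks it with an enumerate loop, index lookahead and a new_lines accumulator that is then newline-joined; B never builds a line list: it scans the raw string with str.find, jumping from marker occurrence to marker occurrence, locates the newline ending the marker's line and the extent of the following line, and emits slices of the original string with an extra blank line inserted where needed.
import Mathlib
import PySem

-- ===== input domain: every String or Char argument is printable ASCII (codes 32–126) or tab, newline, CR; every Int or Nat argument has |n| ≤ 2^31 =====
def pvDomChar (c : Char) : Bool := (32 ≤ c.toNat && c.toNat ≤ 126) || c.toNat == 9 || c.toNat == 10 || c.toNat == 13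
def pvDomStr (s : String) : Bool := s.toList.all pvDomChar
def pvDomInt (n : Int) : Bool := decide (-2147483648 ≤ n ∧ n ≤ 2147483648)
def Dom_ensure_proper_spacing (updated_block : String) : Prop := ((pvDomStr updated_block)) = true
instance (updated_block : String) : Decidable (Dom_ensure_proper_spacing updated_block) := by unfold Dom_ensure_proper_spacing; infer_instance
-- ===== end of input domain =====

-- B replaces A's line-split/enumerate/lookahead loop by a raw-string scanner that jumps
-- from marker occurrence to marker occurrence with str.find and emits slices (alternative algorithm).


-- ===== PORT A =====
-- literal port of A: split on newline, enumerate loop appending to new_lines, lookahead lines[i+1], newline-join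
-- (split? is total here: the separator is a nonempty literal, so .getD [] is never taken)
def ensure_proper_spacing (updated_block : String) : String :=
  let lines := (PySem.Str.split? updated_block "\n").getD []
  let new_lines := (PySem.List.enumerate lines).foldl
    (fun new_lines p =>
      let new_lines := new_lines ++ [p.2]
      if PySem.Str.isIn "\\vspace{3pt}" (PySem.Str.strip p.2) then
        if p.1 + 1 < (lines.length : Int) ∧ PySem.Str.strip (PySem.List.pyGetD lines (p.1 + 1) "") ≠ "" then
          new_lines ++ [""]
        else new_lines
      else new_lines) []
  PySem.Str.join "\n" new_lines

-- ===== PORT B =====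
-- Source B's marker, as chars
def pvM : List Char := ['\\','v','s','p','a','c','e','{','3','p','t','}']

-- termination fact for the port's loop (cited by name in its decreasing_by):
-- when a newline is found at/after the marker, dropping past it strictly shrinks the string
theorem pvSpacingGo_dec (rest : List Char) (j : Int)
    (hj : ¬ PySem.Chars.find rest pvM = -1)
    (hjd : j = PySem.Chars.find rest pvM)
    (heol : ¬ PySem.Chars.findFrom rest ['\n'] j = -1) :
    (PySem.List.slice rest (some (PySem.Chars.findFrom rest ['\n'] j + 1)) none).length < rest.length := by
  subst hjd
  have h0 : (0 : Int) ≤ PySem.Chars.find rest pvM := by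
    have := PySem.Chars.neg_one_le_find rest pvM
    omega
  have hle : (PySem.Chars.find rest pvM).toNat ≤ rest.length := by
    have := PySem.Chars.find_le_length rest pvM
    omega
  have hcast : ((PySem.Chars.find rest pvM).toNat : Int) = PySem.Chars.find rest pvM :=
    Int.toNat_of_nonneg h0
  rw [← hcast] at heol ⊢
  obtain ⟨hk, hpre, -⟩ := PySem.Chars.findFrom_natCast_spec rest ['\n'] _ hle heol
  set e := PySem.Chars.findFrom rest ['\n'] ((PySem.Chars.find rest pvM).toNat : Int) with he
  have h0e : (0 : Int) ≤ e := le_trans (by omega) hk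
  have hlt : e.toNat < rest.length := by
    have hne : rest.drop e.toNat ≠ [] := by
      intro h
      rw [h] at hpre
      exact absurd (List.prefix_nil.mp hpre) (by simp)
    by_contra h
    exact hne (List.drop_eq_nil_of_le (by omega))
  rw [PySem.List.slice_from _ (by omega)]
  simp only [List.length_drop]
  omega

-- literal port of Source B's while loop, on the character list (res, rest) state:
-- find the next marker, find the end of its line, look at the next line, emit the
-- slice up to (and including) that newline plus an optional blank line, drop it, repeat.
def pvSpacingGo (res rest : List Char) : List Char :=
  let j := PySem.Chars.find rest pvM
  if hj : j = -1 then res ++ rest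
  else
    let eol := PySem.Chars.findFrom rest ['\n'] j
    if heol : eol = -1 then res ++ rest
    else
      let nl2 := PySem.Chars.findFrom rest ['\n'] (eol + 1)
      let nxt := if nl2 = -1 then PySem.List.slice rest (some (eol + 1)) none
                 else PySem.List.slice rest (some (eol + 1)) (some nl2)
      let res' := res ++ PySem.List.slice rest none (some (eol + 1)) ++
                  (if PySem.Chars.strip nxt ≠ [] then ['\n'] else [])
      pvSpacingGo res' (PySem.List.slice rest (some (eol + 1)) none)
  termination_by rest.length
  decreasing_by
    · exact pvSpacingGo_dec rest _ (by assumption) rfl heol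

def ensure_proper_spacing_alt (updated_block : String) : String :=
  String.ofList (pvSpacingGo [] updated_block.toList)

-- ===== PRECONDITION & SPEC =====
def Spec_ensure_proper_spacing (updated_block : String) (out : String) : Prop := out = ensure_proper_spacing_alt updated_block
instance (updated_block : String) (out : String) : Decidable (Spec_ensure_proper_spacing updated_block out) := by unfold Spec_ensure_proper_spacing; infer_instance

-- ===== CLAIM (what is proved, stated in full; the proofs are below) =====
def Claim_equal_ensure_proper_spacing : Prop := ∀ (updated_block : String), Dom_ensure_proper_spacing updated_block → Spec_ensure_proper_spacing updated_block (ensure_proper_spacing updated_block)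

-- ===== LEMMAS AND PROOFS =====

-- recursive characterisation of A's new_lines (proof-side only)
def pvBuildA : List String → List String
  | [] => []
  | [x] => [x]
  | x :: y :: rest =>
      x :: ((if PySem.Str.isIn "\\vspace{3pt}" (PySem.Str.strip x) ∧ PySem.Str.strip y ≠ "" then [""] else []) ++ pvBuildA (y :: rest))

-- the same builder on the character level
def bldC : List (List Char) → List (List Char)
  | [] => []
  | [x] => [x]
  | x :: y :: rest =>
      x :: ((if PySem.Chars.isIn pvM (PySem.Chars.strip x) ∧ PySem.Chars.strip y ≠ [] then [[]] else []) ++ bldC (y :: rest))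

theorem pvLoopA (full : List String) (l : List String) (k : Nat) (acc : List String)
    (hl : full.drop k = l) :
    (PySem.List.enumerate l (k : Int)).foldl
      (fun new_lines p =>
        let new_lines := new_lines ++ [p.2]
        if PySem.Str.isIn "\\vspace{3pt}" (PySem.Str.strip p.2) then
          if p.1 + 1 < (full.length : Int) ∧ PySem.Str.strip (PySem.List.pyGetD full (p.1 + 1) "") ≠ "" then
            new_lines ++ [""]
          else new_lines
        else new_lines) acc
    = acc ++ pvBuildA l := by
  induction l generalizing k acc with
  | nil => simp [PySem.List.enumerate_nil, pvBuildA]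
  | cons x t ih =>
    have hk : k < full.length := by
      have := congrArg List.length hl
      simp [List.length_drop] at this
      omega
    have hdrop : full.drop (k + 1) = t := by
      have h : full.drop (k+1) = (full.drop k).drop 1 := by rw [List.drop_drop]
      simp [h, hl]
    rw [PySem.List.enumerate_cons, List.foldl_cons]
    have hcast : (k : Int) + 1 = ((k + 1 : Nat) : Int) := by push_cast; ring
    cases t with
    | nil =>
      have hnotlt : ¬ ((k : Int) + 1 < (full.length : Int) ∧
          PySem.Str.strip (PySem.List.pyGetD full ((k : Int) + 1) "") ≠ "") := by
        have hlen : k + 1 = full.length := by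
          have := congrArg List.length hl
          simp [List.length_drop] at this
          omega
        rintro ⟨h1, -⟩
        rw [hcast] at h1
        exact absurd (by exact_mod_cast h1) (by omega)
      simp only [PySem.List.enumerate_nil, List.foldl_nil, pvBuildA]
      split_ifs <;> simp_all
    | cons y rest =>
      have hget : PySem.List.pyGetD full ((k : Int) + 1) "" = y := by
        rw [hcast, PySem.List.pyGetD_natCast]
        have h : full[(k+1)+0]? = some y := by
          rw [← List.getElem?_drop, hdrop]
          simp
        simp only [Nat.add_zero] at h
        simp [List.getD, h]
      have hlt : (k : Int) + 1 < (full.length : Int) := by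
        have := congrArg List.length hl
        simp [List.length_drop] at this
        omega
      rw [hcast, ih (k+1) _ hdrop, ← hcast]
      simp only [pvBuildA, hget, hlt, true_and]
      split_ifs <;> simp_all

-- PySem's splitOn with a one-character separator is Mathlib's List.splitOn
theorem pvSplitGo (c : Char) (l cur : List Char) (acc : List (List Char)) (fuel : Nat)
    (hf : l.length < fuel) :
    PySem.Chars.splitOn.go [c] fuel l cur acc
      = acc.reverse ++ List.modifyHead (cur.reverse ++ ·) (l.splitOn c) := by
  induction l generalizing fuel cur acc with
  | nil =>
    cases fuel with
    | zero => omega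
    | succ f => simp [PySem.Chars.splitOn.go, List.splitOn_nil]
  | cons ch rest ih =>
    cases fuel with
    | zero => omega
    | succ f =>
      have hsplit : (ch :: rest).splitOn c
          = if ch == c then [] :: rest.splitOn c
            else List.modifyHead (List.cons ch) (rest.splitOn c) := by
        simp [List.splitOn, List.splitOnP_cons]
      have hfr : rest.length < f := by simp at hf; omega
      rw [PySem.Chars.splitOn.go]
      by_cases hc : ch = c
      · subst hc
        have hpre : List.isPrefixOf [ch] (ch :: rest) = true := by
          simp [List.isPrefixOf]
        rw [if_pos hpre]
        simp only [List.length_singleton, List.drop_one, List.tail_cons]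
        rw [ih [] _ f hfr]
        simp only [hsplit, beq_self_eq_true, if_true, List.modifyHead_cons, List.reverse_nil,
          List.nil_append]
        cases rest.splitOn ch <;> simp
      · have hpre : List.isPrefixOf [c] (ch :: rest) = false := by
          simp only [List.isPrefixOf]
          simp
          exact fun h => hc h.symm
        rw [if_neg (by simp [hpre]), ih (ch :: cur) _ f hfr]
        rw [hsplit, if_neg (by simp [hc]), List.modifyHead_modifyHead]
        congr 1
        have : ∀ g h : List Char → List Char, g = h →
            List.modifyHead g (rest.splitOn c) = List.modifyHead h (rest.splitOn c) :=
          fun g h he => by rw [he]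
        apply this
        funext a
        simp

theorem pvSplitOnChar (s : List Char) (c : Char) :
    PySem.Chars.splitOn s [c] = s.splitOn c := by
  rw [PySem.Chars.splitOn, pvSplitGo c s [] [] (s.length + 1) (by omega)]
  cases h : s.splitOn c <;> simp

theorem pvSplitOn_free (s : List Char) (c : Char) : ∀ l ∈ s.splitOn c, c ∉ l := by
  induction s with
  | nil => simp [List.splitOn_nil]
  | cons ch rest ih =>
    have hsplit : (ch :: rest).splitOn c
        = if ch == c then [] :: rest.splitOn c
          else List.modifyHead (List.cons ch) (rest.splitOn c) := by
      simp [List.splitOn, List.splitOnP_cons]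
    rcases hrec : rest.splitOn c with - | ⟨h0, tl⟩
    · exact absurd hrec (by simp [List.splitOn]; exact List.splitOnP_ne_nil _ _)
    · intro l hl
      by_cases hc : ch = c
      · subst hc
        rw [hsplit, if_pos (by simp)] at hl
        rcases List.mem_cons.mp hl with h | h
        · simp [h]
        · exact ih l h
      · rw [hsplit, if_neg (by simp [hc]), hrec, List.modifyHead_cons] at hl
        rcases List.mem_cons.mp hl with h | h
        · subst h
          have hh0 : c ∉ h0 := ih h0 (by rw [hrec]; exact List.mem_cons_self)
          simp [hh0]
          exact fun hx => hc hx.symm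
        · exact ih l (by rw [hrec]; exact List.mem_cons_of_mem _ h)

theorem pvSplitOn_ne_nil (s : List Char) (c : Char) : s.splitOn c ≠ [] := by
  simp [List.splitOn]
  exact List.splitOnP_ne_nil _ _

theorem pvJoinCons (x : List Char) (ys : List (List Char)) (h : ys ≠ []) :
    PySem.Chars.join ['\n'] (x :: ys) = x ++ '\n' :: PySem.Chars.join ['\n'] ys := by
  cases ys with
  | nil => exact absurd rfl h
  | cons y t => rw [PySem.Chars.join_cons_cons]; simp

-- find's value is determined by "an occurrence here, none earlier"
theorem pvFindEq (t M : List Char) (v : Nat) (hv : M <+: t.drop v)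
    (hmin : ∀ i < v, ¬ M <+: t.drop i) : PySem.Chars.find t M = v := by
  have hinf : M <:+: t := hv.isInfix.trans (List.drop_suffix v t).isInfix
  have h0 : 0 ≤ PySem.Chars.find t M := by
    have h1 := (PySem.Chars.find_ne_neg_one_iff t M).mpr hinf
    have h2 := PySem.Chars.neg_one_le_find t M
    omega
  obtain ⟨hp, hm⟩ := PySem.Chars.find_spec h0
  have hne : (PySem.Chars.find t M).toNat = v := by
    rcases Nat.lt_trichotomy (PySem.Chars.find t M).toNat v with h | h | h
    · exact absurd hp (hmin _ h)
    · exact h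
    · exact absurd hv (hm v h)
  omega

theorem pvFindNone (a : List Char) (c : Char) (hc : c ∉ a) :
    PySem.Chars.find a [c] = -1 := by
  rw [PySem.Chars.find_eq_neg_one_iff]
  intro hinf
  exact hc (hinf.subset (by simp))

theorem pvFindChar (a b : List Char) (c : Char) (hc : c ∉ a) :
    PySem.Chars.find (a ++ c :: b) [c] = a.length := by
  apply pvFindEq
  · rw [List.drop_left]
    exact ⟨b, rfl⟩
  · intro i hi hp
    rw [List.drop_append_of_le_length (by omega)] at hp
    obtain ⟨tl, htl⟩ := hp
    rcases hd : a.drop i with - | ⟨a0, arest⟩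
    · have : a.length - i = 0 := by rw [← List.length_drop, hd]; rfl
      omega
    · rw [hd] at htl
      simp only [List.cons_append] at htl
      have : c = a0 := (List.cons.injEq _ _ _ _).mp htl |>.1
      apply hc
      rw [this]
      exact (List.mem_of_mem_drop (i := i)) (by rw [hd]; exact List.mem_cons_self)

-- no occurrence of a newline-free, absent pattern can start inside "l0 ++ newline"
theorem pvNoCross (M l0 t' : List Char) (hNL : '\n' ∉ M)
    (hfree : ¬ M <:+: l0) (i : Nat) (hi : i ≤ l0.length) :
    ¬ M <+: (l0 ++ '\n' :: t').drop i := by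
  intro hp
  rw [List.drop_append_of_le_length hi] at hp
  by_cases hlen : M.length ≤ (l0.drop i).length
  · apply hfree
    have hM2 : M = (l0.drop i).take M.length := by
      have := List.prefix_iff_eq_take.mp hp
      rwa [List.take_append_of_le_length hlen] at this
    have : M <+: l0.drop i := hM2 ▸ List.take_prefix _ _
    exact this.isInfix.trans (List.drop_suffix i l0).isInfix
  · apply hNL
    have hd : (l0.drop i).length < M.length := by omega
    have hg := hp.getElem (i := (l0.drop i).length) hd
    rw [List.getElem_append_right (le_refl _)] at hg
    simp at hg
    rw [← hg]
    exact List.getElem_mem _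

theorem pvPeelLeft (M : List Char) (hM : M ≠ [])
    (hsp : ∀ ch ∈ M, PySem.Chars.isspace ch = false) :
    ∀ w, (∀ ch ∈ w, PySem.Chars.isspace ch = true) → ∀ x, M <:+: w ++ x → M <:+: x := by
  intro w
  induction w with
  | nil => intro _ x h; simpa using h
  | cons c w' ih =>
    intro hw x h
    rw [List.cons_append, List.infix_cons_iff] at h
    rcases h with h | h
    · exfalso
      rcases M with - | ⟨m0, M'⟩
      · exact hM rfl
      · obtain ⟨tl, htl⟩ := h
        have : m0 = c := (List.cons.injEq _ _ _ _).mp htl |>.1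
        have h1 := hsp m0 List.mem_cons_self
        have h2 := hw c List.mem_cons_self
        rw [this, h2] at h1
        simp at h1
    · exact ih (fun ch hch => hw ch (List.mem_cons_of_mem _ hch)) x h

-- stripping does not change whether a nonempty all-non-whitespace pattern occurs
theorem pvStripInfix (M l : List Char) (hM : M ≠ [])
    (hsp : ∀ ch ∈ M, PySem.Chars.isspace ch = false) :
    M <:+: PySem.Chars.strip l ↔ M <:+: l := by
  have hdecomp : ∃ w1 w2, l = w1 ++ PySem.Chars.strip l ++ w2 ∧
      (∀ ch ∈ w1, PySem.Chars.isspace ch = true) ∧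
      (∀ ch ∈ w2, PySem.Chars.isspace ch = true) := by
    refine ⟨l.takeWhile PySem.Chars.isspace,
      ((PySem.Chars.lstrip l).reverse.takeWhile PySem.Chars.isspace).reverse, ?_, ?_, ?_⟩
    · have h1 : l = l.takeWhile PySem.Chars.isspace ++ PySem.Chars.lstrip l := by
        rw [PySem.Chars.lstrip, List.takeWhile_append_dropWhile]
      have h2 : PySem.Chars.lstrip l = PySem.Chars.strip l ++
          ((PySem.Chars.lstrip l).reverse.takeWhile PySem.Chars.isspace).reverse := by
        rw [PySem.Chars.strip, PySem.Chars.rstrip]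
        conv_lhs => rw [← List.reverse_reverse (PySem.Chars.lstrip l),
          ← List.takeWhile_append_dropWhile (p := PySem.Chars.isspace)
            (l := (PySem.Chars.lstrip l).reverse)]
        rw [List.reverse_append]
      rw [List.append_assoc, ← h2]
      exact h1
    · exact fun ch hch => List.mem_takeWhile_imp hch
    · intro ch hch
      rw [List.mem_reverse] at hch
      exact List.mem_takeWhile_imp hch
  obtain ⟨w1, w2, hl, hw1, hw2⟩ := hdecomp
  constructor
  · intro h
    apply List.IsInfix.trans h
    exact ⟨w1, w2, hl.symm⟩
  · intro h
    rw [hl] at h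
    have h1 : M <:+: PySem.Chars.strip l ++ w2 := by
      rw [List.append_assoc] at h
      exact pvPeelLeft M hM hsp w1 hw1 _ h
    have h2 : M.reverse <:+: w2.reverse ++ (PySem.Chars.strip l).reverse := by
      rw [← List.reverse_append]
      exact List.reverse_infix.mpr h1
    have h3 := pvPeelLeft M.reverse (by simpa using hM)
      (fun ch hch => hsp ch (List.mem_reverse.mp hch)) w2.reverse
      (fun ch hch => hw2 ch (List.mem_reverse.mp hch)) _ h2
    exact List.reverse_infix.mp h3

theorem pvAccGen (res1 : List Char) (res t : List Char) :
    pvSpacingGo (res1 ++ res) t = res1 ++ pvSpacingGo res t := by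
  fun_induction pvSpacingGo res t with
  | case1 res t j hj =>
    rw [pvSpacingGo, dif_pos hj, List.append_assoc]
  | case2 res t j hj eol heol =>
    rw [pvSpacingGo, dif_neg hj, dif_pos heol, List.append_assoc]
  | case3 res t j hj eol heol nl2 nxt res' ih =>
    rw [pvSpacingGo, dif_neg hj, dif_neg heol]
    have h : ∀ X opt : List Char, res1 ++ res ++ X ++ opt = res1 ++ (res ++ X ++ opt) := by
      intro X opt
      simp [List.append_assoc]
    show pvSpacingGo (res1 ++ res ++ _ ++ _) _ = _
    rw [h _ _]
    exact ih

theorem pvAcc (t res : List Char) : pvSpacingGo res t = res ++ pvSpacingGo [] t := by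
  have := pvAccGen res [] t
  simpa using this

theorem pvMne : pvM ≠ [] := by decide

theorem pvMnl : '\n' ∉ pvM := by simp [pvM]

theorem pvMsp : ∀ ch ∈ pvM, PySem.Chars.isspace ch = false := by
  intro ch hch
  fin_cases hch <;> rfl

-- findFrom for the newline searched at/after offset x.length + 1 + k only sees the tail
theorem pvFindFromShift (x t' : List Char) (k : Nat) (hk : k ≤ t'.length) :
    PySem.Chars.findFrom (x ++ '\n' :: t') ['\n'] ((x.length + 1 + k : Nat) : Int)
      = if PySem.Chars.findFrom t' ['\n'] (k : Int) = -1 then -1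
        else ((x.length + 1 : Nat) : Int) + PySem.Chars.findFrom t' ['\n'] (k : Int) := by
  have hlen : x.length + 1 + k ≤ (x ++ '\n' :: t').length := by simp; omega
  rw [PySem.Chars.findFrom_natCast _ _ _ hlen, PySem.Chars.findFrom_natCast _ _ _ hk]
  have hd : (x ++ '\n' :: t').drop (x.length + 1 + k)
      = t'.drop k := by
    have : x.length + 1 + k = x.length + (1 + k) := by omega
    rw [this, List.drop_length_add_append]
    rw [show 1 + k = k + 1 by omega, List.drop_succ_cons]
  rw [hd]
  by_cases hA : PySem.Chars.find (List.drop k t') ['\n'] = -1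
  · simp [hA]
  · have h0 : 0 ≤ PySem.Chars.find (List.drop k t') ['\n'] := by
      have := PySem.Chars.neg_one_le_find (List.drop k t') ['\n']
      omega
    simp only [if_neg hA]
    rw [if_neg (by omega)]
    push_cast
    ring

-- peeling one marker-free line off the front of the scanner's input
theorem pvShift (x t' : List Char) (hx : ¬ pvM <:+: x) :
    pvSpacingGo [] (x ++ '\n' :: t') = x ++ '\n' :: pvSpacingGo [] t' := by
  by_cases hj' : PySem.Chars.find t' pvM = -1
  · have hjt : PySem.Chars.find (x ++ '\n' :: t') pvM = -1 := by
      rw [PySem.Chars.find_eq_neg_one_iff]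
      intro hinf
      obtain ⟨p, q, hpq⟩ := hinf
      have hpre : pvM <+: (x ++ '\n' :: t').drop p.length := by
        rw [← hpq, List.append_assoc, List.drop_left]
        exact ⟨q, rfl⟩
      by_cases hip : p.length ≤ x.length
      · exact pvNoCross pvM x t' pvMnl hx p.length hip hpre
      · rw [show p.length = x.length + (1 + (p.length - x.length - 1)) by omega,
          List.drop_length_add_append,
          show 1 + (p.length - x.length - 1) = (p.length - x.length - 1) + 1 by omega,
          List.drop_succ_cons] at hpre
        have : pvM <:+: t' := hpre.isInfix.trans (List.drop_suffix _ t').isInfix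
        exact ((PySem.Chars.find_ne_neg_one_iff t' pvM).mpr this) hj'
    rw [pvSpacingGo, dif_pos hjt]
    conv_rhs => rw [pvSpacingGo, dif_pos hj']
    simp
  · have hfind0 : 0 ≤ PySem.Chars.find t' pvM := by
      have := PySem.Chars.neg_one_le_find t' pvM
      omega
    have hj'len : (PySem.Chars.find t' pvM).toNat ≤ t'.length := by
      have := PySem.Chars.find_le_length t' pvM
      omega
    have hjcast : (((PySem.Chars.find t' pvM).toNat : Nat) : Int) = PySem.Chars.find t' pvM :=
      Int.toNat_of_nonneg hfind0
    obtain ⟨hpre', hmin'⟩ := PySem.Chars.find_spec (s := t') (sub := pvM) hfind0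
    have hjt : PySem.Chars.find (x ++ '\n' :: t') pvM
        = ((x.length + 1 + (PySem.Chars.find t' pvM).toNat : Nat) : Int) := by
      apply pvFindEq
      · rw [show x.length + 1 + (PySem.Chars.find t' pvM).toNat
            = x.length + (1 + (PySem.Chars.find t' pvM).toNat) by omega,
          List.drop_length_add_append,
          show 1 + (PySem.Chars.find t' pvM).toNat = (PySem.Chars.find t' pvM).toNat + 1 by omega,
          List.drop_succ_cons]
        exact hpre'
      · intro i hi
        by_cases hip : i ≤ x.length
        · exact pvNoCross pvM x t' pvMnl hx i hip
        · rw [show i = x.length + (1 + (i - x.length - 1)) by omega,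
            List.drop_length_add_append,
            show 1 + (i - x.length - 1) = (i - x.length - 1) + 1 by omega,
            List.drop_succ_cons]
          exact hmin' _ (by omega)
    rw [pvSpacingGo, dif_neg (by rw [hjt]; omega)]
    conv_rhs => rw [pvSpacingGo, dif_neg hj']
    rw [hjt]
    conv_rhs => rw [← hjcast]
    have hshift1 := pvFindFromShift x t' (PySem.Chars.find t' pvM).toNat hj'len
    by_cases heol' : PySem.Chars.findFrom t' ['\n'] (((PySem.Chars.find t' pvM).toNat : Nat) : Int) = -1
    · rw [dif_pos (by rw [hshift1, if_pos heol']), dif_pos heol']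
      simp
    · obtain ⟨hk2, hpre2, -⟩ := PySem.Chars.findFrom_natCast_spec t' ['\n'] _ hj'len heol'
      have h0e : 0 ≤ PySem.Chars.findFrom t' ['\n'] (((PySem.Chars.find t' pvM).toNat : Nat) : Int) :=
        le_trans (by omega) hk2
      set e' := PySem.Chars.findFrom t' ['\n'] (((PySem.Chars.find t' pvM).toNat : Nat) : Int) with he'
      have hlt : e'.toNat < t'.length := by
        have hne : t'.drop e'.toNat ≠ [] := by
          intro h
          rw [h] at hpre2
          exact absurd (List.prefix_nil.mp hpre2) (by simp)
        by_contra h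
        exact hne (List.drop_eq_nil_of_le (by omega))
      have heolt : PySem.Chars.findFrom (x ++ '\n' :: t') ['\n']
          ((x.length + 1 + (PySem.Chars.find t' pvM).toNat : Nat) : Int)
          = ((x.length + 1 : Nat) : Int) + e' := by
        rw [hshift1, if_neg heol']
      rw [dif_neg (by rw [heolt]; omega), dif_neg heol']
      -- align the next-newline search, the slices and the recursive argument
      have hecast : ((x.length + 1 : Nat) : Int) + e' + 1
          = ((x.length + 1 + (e'.toNat + 1) : Nat) : Int) := by
        push_cast [Int.toNat_of_nonneg h0e]
        ring
      have hecast2 : ((e'.toNat + 1 : Nat) : Int) = e' + 1 := by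
        push_cast [Int.toNat_of_nonneg h0e]
        ring
      have hshift2 := pvFindFromShift x t' (e'.toNat + 1) (by omega)
      rw [hecast2] at hshift2
      have htake : PySem.List.slice (x ++ '\n' :: t') none (some (((x.length + 1 : Nat) : Int) + e' + 1))
          = x ++ '\n' :: t'.take (e'.toNat + 1) := by
        rw [hecast, PySem.List.slice_to _ (by omega), Int.toNat_natCast,
          show x.length + 1 + (e'.toNat + 1) = x.length + (1 + (e'.toNat + 1)) by omega,
          List.take_length_add_append,
          show 1 + (e'.toNat + 1) = (e'.toNat + 1) + 1 by omega,
          List.take_succ_cons]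
      have hdrop : PySem.List.slice (x ++ '\n' :: t') (some (((x.length + 1 : Nat) : Int) + e' + 1)) none
          = t'.drop (e'.toNat + 1) := by
        rw [hecast, PySem.List.slice_from _ (by omega), Int.toNat_natCast,
          show x.length + 1 + (e'.toNat + 1) = x.length + (1 + (e'.toNat + 1)) by omega,
          List.drop_length_add_append,
          show 1 + (e'.toNat + 1) = (e'.toNat + 1) + 1 by omega,
          List.drop_succ_cons]
      have hdrop' : PySem.List.slice t' (some (e' + 1)) none = t'.drop (e'.toNat + 1) := by
        rw [PySem.List.slice_from _ (by omega)]
        congr 1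
        omega
      have hnxt : (if PySem.Chars.findFrom (x ++ '\n' :: t') ['\n'] (((x.length + 1 : Nat) : Int) + e' + 1) = -1
            then PySem.List.slice (x ++ '\n' :: t') (some (((x.length + 1 : Nat) : Int) + e' + 1)) none
            else PySem.List.slice (x ++ '\n' :: t') (some (((x.length + 1 : Nat) : Int) + e' + 1))
              (some (PySem.Chars.findFrom (x ++ '\n' :: t') ['\n'] (((x.length + 1 : Nat) : Int) + e' + 1))))
          = (if PySem.Chars.findFrom t' ['\n'] (e' + 1) = -1
            then PySem.List.slice t' (some (e' + 1)) none
            else PySem.List.slice t' (some (e' + 1)) (some (PySem.Chars.findFrom t' ['\n'] (e' + 1)))) := by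
        rw [hecast, hshift2]
        by_cases hnl2' : PySem.Chars.findFrom t' ['\n'] (e' + 1) = -1
        · rw [if_pos hnl2', if_pos (rfl : (-1 : Int) = -1), if_pos hnl2', ← hecast, hdrop, hdrop']
        · have h0n : 0 ≤ PySem.Chars.findFrom t' ['\n'] (e' + 1) := by
            obtain ⟨hka, -, -⟩ := PySem.Chars.findFrom_natCast_spec t' ['\n'] (e'.toNat + 1)
              (by omega) (by rw [hecast2]; exact hnl2')
            rw [hecast2] at hka
            omega
          simp only [if_neg hnl2']
          rw [if_neg (show ¬(((x.length + 1 : Nat) : Int) + PySem.Chars.findFrom t' ['\n'] (e' + 1)) = -1 by omega)]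
          rw [PySem.List.slice_toNat _ (by omega) (by omega),
            PySem.List.slice_toNat _ (by omega) (by omega)]
          rw [Int.toNat_natCast,
            show x.length + 1 + (e'.toNat + 1) = x.length + (1 + (e'.toNat + 1)) by omega,
            List.drop_length_add_append,
            show 1 + (e'.toNat + 1) = (e'.toNat + 1) + 1 by omega,
            List.drop_succ_cons,
            show ((e' + 1 : Int)).toNat = e'.toNat + 1 by omega]
          congr 1
          omega
      have htake' : PySem.List.slice t' none (some (e' + 1)) = t'.take (e'.toNat + 1) := by
        rw [PySem.List.slice_to _ (by omega)]
        congr 1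
        omega
      rw [heolt]
      simp only []
      rw [hnxt, htake, hdrop, hdrop']
      rw [pvAcc, pvAcc (t := t'.drop (e'.toNat + 1))]
      rw [htake']
      conv_rhs => rw [pvAcc]
      simp [List.append_assoc]

theorem pvBldC_ne_nil (ls : List (List Char)) (h : ls ≠ []) : bldC ls ≠ [] := by
  match ls with
  | [] => exact absurd rfl h
  | [x] => simp [bldC]
  | x :: y :: rest => simp [bldC]

-- the heart: on a joined list of newline-free lines the scanner computes the builder's output
theorem pvMain (ls : List (List Char)) (hne : ls ≠ [])
    (hfree : ∀ l ∈ ls, '\n' ∉ l) :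
    pvSpacingGo [] (PySem.Chars.join ['\n'] ls) = PySem.Chars.join ['\n'] (bldC ls) := by
  induction ls with
  | nil => exact absurd rfl hne
  | cons x ls' ih =>
    cases ls' with
    | nil =>
      have hxfree : '\n' ∉ x := hfree x List.mem_cons_self
      rw [show bldC [x] = [x] from rfl, PySem.Chars.join_singleton]
      rw [pvSpacingGo]
      by_cases hj : PySem.Chars.find x pvM = -1
      · rw [dif_pos hj]
        simp
      · rw [dif_neg hj]
        have h0 : 0 ≤ PySem.Chars.find x pvM := by
          have := PySem.Chars.neg_one_le_find x pvM
          omega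
        have hle : (PySem.Chars.find x pvM).toNat ≤ x.length := by
          have := PySem.Chars.find_le_length x pvM
          omega
        have heol : PySem.Chars.findFrom x ['\n'] (PySem.Chars.find x pvM) = -1 := by
          rw [← Int.toNat_of_nonneg h0, PySem.Chars.findFrom_natCast _ _ _ hle,
            pvFindNone _ _ (fun h => hxfree (List.mem_of_mem_drop h))]
          simp
        rw [dif_pos heol]
        simp
    | cons y r =>
      have hxf : '\n' ∉ x := hfree x List.mem_cons_self
      have hf' : ∀ l ∈ y :: r, '\n' ∉ l := fun l hl => hfree l (List.mem_cons_of_mem _ hl)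
      have hyf : '\n' ∉ y := hf' y List.mem_cons_self
      have hT : PySem.Chars.join ['\n'] (x :: y :: r)
          = x ++ '\n' :: PySem.Chars.join ['\n'] (y :: r) := pvJoinCons x _ (by simp)
      rw [hT]
      by_cases hm : pvM <:+: x
      · -- marker in the head line: the scanner emits "x\n", an optional blank line, and recurses
        set T' := PySem.Chars.join ['\n'] (y :: r) with hT'
        set t := x ++ '\n' :: T' with ht
        have hmt : pvM <:+: t := hm.trans ⟨[], '\n' :: T', by rw [ht]; simp⟩
        have hj : ¬ PySem.Chars.find t pvM = -1 := by
          intro h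
          rw [PySem.Chars.find_eq_neg_one_iff] at h
          exact h hmt
        have h0 : 0 ≤ PySem.Chars.find t pvM := by
          have := PySem.Chars.neg_one_le_find t pvM
          omega
        -- the first occurrence starts inside x
        obtain ⟨p, q, hpq⟩ := id hm
        have hocc : pvM <+: t.drop p.length := by
          have hre : t = p ++ (pvM ++ (q ++ '\n' :: T')) := by
            rw [ht, ← hpq]
            simp
          rw [hre, List.drop_left]
          exact List.prefix_append _ _
        have hjp : (PySem.Chars.find t pvM).toNat ≤ p.length := by
          obtain ⟨-, hmin⟩ := PySem.Chars.find_spec (s := t) (sub := pvM) h0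
          by_contra hgt
          exact hmin p.length (by omega) hocc
        have hjx : (PySem.Chars.find t pvM).toNat ≤ x.length := by
          have : p.length ≤ x.length := by
            have := congrArg List.length hpq
            simp at this
            omega
          omega
        have hjt : (PySem.Chars.find t pvM).toNat ≤ t.length := by
          have hlt : t.length = x.length + 1 + T'.length := by
            rw [ht]
            simp
            omega
          omega
        have heolt : PySem.Chars.findFrom t ['\n'] (PySem.Chars.find t pvM) = (x.length : Int) := by
          rw [← Int.toNat_of_nonneg h0, PySem.Chars.findFrom_natCast _ _ _ hjt]
          have hdx : t.drop (PySem.Chars.find t pvM).toNat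
              = x.drop (PySem.Chars.find t pvM).toNat ++ '\n' :: T' := by
            rw [ht, List.drop_append_of_le_length hjx]
          rw [hdx, pvFindChar _ _ _ (fun h => hxf (List.mem_of_mem_drop h))]
          rw [if_neg (by simp), List.length_drop]
          omega
        rw [pvSpacingGo, dif_neg hj, dif_neg (by rw [heolt]; omega)]
        rw [heolt]
        simp only []
        -- the next line is y, whether or not it is the last
        have hs1 : (x.length : Int) + 1 = ((x.length + 1 : Nat) : Int) := by push_cast; ring
        have hlen1 : x.length + 1 ≤ t.length := by
          rw [ht]
          simp
        have hdrop1 : t.drop (x.length + 1) = T' := by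
          rw [ht, show x.length + 1 = x.length + (1 + 0) by omega,
            List.drop_length_add_append]
          simp
        have hnxt : (if PySem.Chars.findFrom t ['\n'] ((x.length : Int) + 1) = -1
              then PySem.List.slice t (some ((x.length : Int) + 1)) none
              else PySem.List.slice t (some ((x.length : Int) + 1))
                (some (PySem.Chars.findFrom t ['\n'] ((x.length : Int) + 1)))) = y := by
          have hff : PySem.Chars.findFrom t ['\n'] ((x.length : Int) + 1)
              = if PySem.Chars.find T' ['\n'] = -1 then -1
                else ((x.length + 1 : Nat) : Int) + PySem.Chars.find T' ['\n'] := by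
            rw [hs1, PySem.Chars.findFrom_natCast _ _ _ hlen1, hdrop1]
          cases r with
          | nil =>
            have hTy : T' = y := by rw [hT', PySem.Chars.join_singleton]
            have hfy : PySem.Chars.find T' ['\n'] = -1 := by
              rw [hTy]
              exact pvFindNone _ _ hyf
            rw [hff, if_pos hfy, if_pos rfl, PySem.List.slice_from _ (by omega), hs1,
              Int.toNat_natCast, hdrop1, hTy]
          | cons r0 rr =>
            have hTy : T' = y ++ '\n' :: PySem.Chars.join ['\n'] (r0 :: rr) := by
              rw [hT']
              exact pvJoinCons y _ (by simp)
            have hfy : PySem.Chars.find T' ['\n'] = (y.length : Int) := by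
              rw [hTy]
              exact pvFindChar _ _ _ hyf
            rw [hff, if_neg (by rw [hfy]; omega), if_neg (by rw [hfy]; omega)]
            rw [hfy, PySem.List.slice_toNat _ (by omega) (by omega)]
            rw [show ((x.length : Int) + 1).toNat = x.length + 1 by omega,
              show (((x.length + 1 : Nat) : Int) + (y.length : Int)).toNat
                = x.length + 1 + y.length by omega,
              hdrop1, hTy]
            rw [show x.length + 1 + y.length - (x.length + 1) = y.length by omega]
            exact List.take_left
        have htk : PySem.List.slice t none (some ((x.length : Int) + 1)) = x ++ ['\n'] := by
          rw [PySem.List.slice_to _ (by omega), show ((x.length : Int) + 1).toNat = x.length + 1 by omega]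
          rw [ht, show x.length + 1 = x.length + (0 + 1) by omega, List.take_length_add_append]
          simp
        have hdr : PySem.List.slice t (some ((x.length : Int) + 1)) none = T' := by
          rw [PySem.List.slice_from _ (by omega), show ((x.length : Int) + 1).toNat = x.length + 1 by omega]
          exact hdrop1
        rw [hnxt, htk, hdr, pvAcc, ih (by simp) hf']
        -- fold the builder on the other side
        have hcondx : PySem.Chars.isIn pvM (PySem.Chars.strip x) = true := by
          rw [PySem.Chars.isIn_iff_infix]
          exact (pvStripInfix pvM x pvMne pvMsp).mpr hm
        by_cases hy : PySem.Chars.strip y = []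
        · have hb : bldC (x :: y :: r) = x :: bldC (y :: r) := by
            rw [bldC]
            rw [if_neg (by simp [hy])]
            simp
          rw [hb, pvJoinCons x _ (pvBldC_ne_nil _ (by simp))]
          have hsy : PySem.Chars.strip y = [] := hy
          simp [hsy]
        · have hb : bldC (x :: y :: r) = x :: [] :: bldC (y :: r) := by
            rw [bldC]
            rw [if_pos (by simp [hcondx, hy])]
            simp
          rw [hb, PySem.Chars.join_cons_cons, pvJoinCons [] _ (pvBldC_ne_nil _ (by simp))]
          simp [hy]
      · rw [pvShift x _ hm, ih (by simp) hf']
        have hcondx : PySem.Chars.isIn pvM (PySem.Chars.strip x) = false := by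
          rw [PySem.Chars.isIn_eq_false_iff]
          intro h
          exact hm ((pvStripInfix pvM x pvMne pvMsp).mp h)
        have hb : bldC (x :: y :: r) = x :: bldC (y :: r) := by
          rw [bldC]
          rw [if_neg (by simp [hcondx])]
          simp
        rw [hb, pvJoinCons x _ (pvBldC_ne_nil _ (by simp))]

theorem pvMapBld (L : List String) :
    (pvBuildA L).map String.toList = bldC (L.map String.toList) := by
  induction L using pvBuildA.induct with
  | case1 => rfl
  | case2 x => rfl
  | case3 x y rest ih =>
    have hisin : PySem.Str.isIn "\\vspace{3pt}" (PySem.Str.strip x)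
        = PySem.Chars.isIn pvM (PySem.Chars.strip x.toList) := by
      rw [PySem.Str.isIn_eq, PySem.Str.toList_strip]
      rfl
    have hstr0 : (PySem.Str.strip y = "") ↔ (PySem.Chars.strip y.toList = []) := by
      rw [← PySem.Str.toList_strip]
      constructor
      · intro h
        rw [h]
        rfl
      · intro h
        apply String.toList_inj.mp
        rw [h]
        rfl
    simp only [pvBuildA, List.map_cons, List.map_append, bldC, ih]
    by_cases h : PySem.Chars.isIn pvM (PySem.Chars.strip x.toList) = true
        ∧ PySem.Chars.strip y.toList ≠ []
    · rw [if_pos (by rw [hisin]; exact ⟨h.1, fun he => h.2 (hstr0.mp he)⟩), if_pos h]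
      rfl
    · rw [if_neg (by rw [hisin]; exact fun hc => h ⟨hc.1, fun he => hc.2 (hstr0.mpr he)⟩),
        if_neg h]
      simp

-- ===== VERDICT (by name: the statement is the Claim_ definition above) =====
theorem ensure_proper_spacing_spec : Claim_equal_ensure_proper_spacing := by
  intro ub _
  show ensure_proper_spacing ub = ensure_proper_spacing_alt ub
  unfold ensure_proper_spacing ensure_proper_spacing_alt
  simp only []
  have h0 : PySem.List.enumerate ((PySem.Str.split? ub "\n").getD [])
      = PySem.List.enumerate ((PySem.Str.split? ub "\n").getD []) ((0 : Nat) : Int) := by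
    norm_num
  rw [h0, pvLoopA _ _ 0 [] (by simp), List.nil_append]
  rw [← String.toList_inj, PySem.Str.toList_join]
  have hofl : (String.ofList (pvSpacingGo [] ub.toList)).toList = pvSpacingGo [] ub.toList := by
    simp
  rw [hofl, pvMapBld]
  have hsome := PySem.Str.split?_map ub "\n"
  have hmap : ((PySem.Str.split? ub "\n").getD []).map String.toList
      = ub.toList.splitOn '\n' := by
    cases hsp : PySem.Str.split? ub "\n" with
    | none =>
      rw [hsp] at hsome
      simp [PySem.Chars.split?] at hsome
    | some L0 =>
      rw [hsp] at hsome
      simp only [Option.map_some, Option.getD_some] at hsome ⊢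
      have hs2 : PySem.Chars.split? ub.toList ("\n".toList)
          = some (PySem.Chars.splitOn ub.toList ['\n']) := by
        rw [show ("\n" : String).toList = ['\n'] from rfl, PySem.Chars.split?, if_neg (by simp)]
      rw [hs2] at hsome
      rw [Option.some.inj hsome, pvSplitOnChar]
  rw [hmap]
  have hjoin : PySem.Chars.join ("\n".toList) (ub.toList.splitOn '\n') = ub.toList := by
    rw [show ("\n" : String).toList = ['\n'] from rfl, PySem.Chars.join]
    exact List.intercalate_splitOn ub.toList '\n'
  have := pvMain (ub.toList.splitOn '\n') (pvSplitOn_ne_nil _ _)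
    (pvSplitOn_free _ _)
  rw [show ("\n" : String).toList = ['\n'] from rfl] at hjoin ⊢
  rw [← this, hjoin]
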